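-- pv_equiv track=rewrite | github.com/gjeunen/reference_database_creator | function/crabs_functions.py | unknown_base_conversion
-- ===== SOURCE A (Python) =====
-- def unknown_base_conversion(oligo):
--     '''
--     takes in an oligo nucleotide string and sets unidentified bases to "N"
--     '''
--     known_bases = {'A': 'yes', 'C': 'yes', 'G': 'yes', 'T': 'yes', 'R': 'yes', 'Y': 'yes', 'S': 'yes', 'W': 'yes',
--                    'K': 'yes', 'M': 'yes', 'B': 'yes', 'D': 'yes', 'H': 'yes', 'V': 'yes', 'N': 'yes'}
--     new_oligo = ''
--     for item in oligo.upper():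
--         if item in known_bases:
--             new_oligo += item
--         else:
--             new_oligo += 'N'
--     return new_oligo
-- ===== SOURCE B (Python) =====
-- import re
--
-- def unknown_base_conversion(oligo):
--     '''
--     takes in an oligo nucleotide string and sets unidentified bases to "N"
--     '''
--     return re.sub('[^ACGTRYSWKMBDHVN]', 'N', oligo.upper())
-- ===== Notes on version B (the rewrite author's own statement) =====
-- stated objective: idiomatic
-- what changed: Replaces the explicit accumulation loop with per-character dict membership by a single regex substitution over the uppercased string with a negated character class of the 15 IUPAC bases.
import Mathlib
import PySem

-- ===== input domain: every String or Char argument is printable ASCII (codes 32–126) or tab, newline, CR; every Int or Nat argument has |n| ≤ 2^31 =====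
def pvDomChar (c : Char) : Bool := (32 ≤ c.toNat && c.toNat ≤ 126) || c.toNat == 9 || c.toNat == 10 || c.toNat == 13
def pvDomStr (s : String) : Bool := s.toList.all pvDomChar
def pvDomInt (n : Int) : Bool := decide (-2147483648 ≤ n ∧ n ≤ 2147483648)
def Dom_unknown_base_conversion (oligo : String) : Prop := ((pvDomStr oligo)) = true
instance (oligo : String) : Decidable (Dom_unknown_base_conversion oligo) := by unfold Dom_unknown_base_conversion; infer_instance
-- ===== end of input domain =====

-- B replaces A's accumulation loop over a membership dict by one regex substitution
-- ('[^ACGTRYSWKMBDHVN]' → 'N') over the uppercased string (objective: idiomatic).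

-- ===== PORT A =====
-- the known_bases dict of A
def ubcKnownBases : PySem.Dict Char String :=
  PySem.Dict.ofList [('A', "yes"), ('C', "yes"), ('G', "yes"), ('T', "yes"), ('R', "yes"),
                     ('Y', "yes"), ('S', "yes"), ('W', "yes"), ('K', "yes"), ('M', "yes"),
                     ('B', "yes"), ('D', "yes"), ('H', "yes"), ('V', "yes"), ('N', "yes")]

def unknown_base_conversion (oligo : String) : String :=
  (PySem.Str.upper oligo).toList.foldl
    (fun new_oligo item =>
      if ubcKnownBases.contains item then new_oligo ++ String.ofList [item]
      else new_oligo ++ "N") ""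

-- ===== PORT B =====
-- re.sub('[^ACGTRYSWKMBDHVN]', 'N', oligo.upper()): the regex engine replaces each
-- character outside the class by 'N' in one pass, i.e. maps the class test over the chars.
def ubcClass : List Char := "ACGTRYSWKMBDHVN".toList

def unknown_base_conversion_alt (oligo : String) : String :=
  String.ofList ((PySem.Str.upper oligo).toList.map
    (fun c => if ubcClass.contains c then c else 'N'))

-- ===== PRECONDITION & SPEC =====
def Spec_unknown_base_conversion (oligo : String) (out : String) : Prop := out = unknown_base_conversion_alt oligo
instance (oligo : String) (out : String) : Decidable (Spec_unknown_base_conversion oligo out) := by unfold Spec_unknown_base_conversion; infer_instance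

-- ===== CLAIM (what is proved, stated in full; the proofs are below) =====
def Claim_equal_unknown_base_conversion : Prop := ∀ (oligo : String), Dom_unknown_base_conversion oligo → Spec_unknown_base_conversion oligo (unknown_base_conversion oligo)

-- ===== LEMMAS AND PROOFS =====

-- A's dict-membership test agrees with B's character-class test on every char
theorem ubc_contains_eq (c : Char) :
    ubcKnownBases.contains c = ubcClass.contains c := by
  rw [PySem.Dict.contains_eq_decide_mem_keys]
  have h : ubcKnownBases.keys = ubcClass := by decide
  rw [h]; simp

theorem ubc_foldl_eq (l : List Char) (s : String) :
    l.foldl (fun acc item =>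
        if ubcKnownBases.contains item then acc ++ String.ofList [item] else acc ++ "N") s
      = s ++ String.ofList (l.map (fun c => if ubcClass.contains c then c else 'N')) := by
  induction l generalizing s with
  | nil => simp
  | cons c cs ih =>
      rw [List.foldl_cons, ih, List.map_cons, ubc_contains_eq c]
      by_cases h : c ∈ ubcClass
      · simp [h, String.append_assoc, ← String.ofList_append]
      · have h' : ¬ ubcClass.contains c = true := by simpa using h
        rw [if_neg h', if_neg h', String.append_assoc,
            show ("N":String) = String.ofList ['N'] from rfl, ← String.ofList_append]
        rfl

-- ===== VERDICT (by name: the statement is the Claim_ definition above) =====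
theorem unknown_base_conversion_spec : Claim_equal_unknown_base_conversion := by
  intro oligo _
  unfold Spec_unknown_base_conversion unknown_base_conversion unknown_base_conversion_alt
  simpa using ubc_foldl_eq (PySem.Str.upper oligo).toList ""
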